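-- pv_equiv track=rewrite | github.com/dyfawa4/WebSecToolkit | modules/workflow/report_generator.py | _generate_findings_html
-- ===== SOURCE A (Python) =====
-- from typing import Dict, List, Any, Optional
--
-- def _generate_findings_html(result: Dict) -> str:
--     findings = result.get("findings", [])
--
--     if not findings:
--         return '<div class="section"><h2>📋 漏洞详情</h2><p>未发现漏洞</p></div>'
--
--     severity_order = {"critical": 0, "high": 1, "medium": 2, "low": 3, "info": 4}
--     sorted_findings = sorted(findings, key=lambda x: severity_order.get(x.get("severity", "info").lower(), 5))
--
--     findings_html = '<div class="section"><h2>📋 漏洞详情</h2>'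
--
--     for finding in sorted_findings:
--         severity = finding.get("severity", "info").lower()
--         title = finding.get("title", "Unknown")
--         description = finding.get("description", "")
--         evidence = finding.get("evidence", "")
--         url = finding.get("url", "")
--
--         findings_html += f"""
--         <div class="finding {severity}">
--             <h4>{title} <span class="severity {severity}">{severity.upper()}</span></h4>
--             <p class="description">{description}</p>
--             {f'<p><strong>URL:</strong> {url}</p>' if url else ''}
--             {f'<div class="evidence">{evidence[:500]}</div>' if evidence else ''}
--         </div>"""
--
--     findings_html += '</div>'
--     return findings_html
-- ===== SOURCE B (Python) =====
-- _SEVERITY_ORDER = {"critical": 0, "high": 1, "medium": 2, "low": 3, "info": 4}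
--
--
-- def _severity_key(finding):
--     return _SEVERITY_ORDER.get(finding.get("severity", "info").lower(), 5)
--
--
-- def _finding_html(finding):
--     severity = finding.get("severity", "info").lower()
--     title = finding.get("title", "Unknown")
--     description = finding.get("description", "")
--     evidence = finding.get("evidence", "")
--     url = finding.get("url", "")
--     return f"""
--         <div class="finding {severity}">
--             <h4>{title} <span class="severity {severity}">{severity.upper()}</span></h4>
--             <p class="description">{description}</p>
--             {f'<p><strong>URL:</strong> {url}</p>' if url else ''}
--             {f'<div class="evidence">{evidence[:500]}</div>' if evidence else ''}
--         </div>"""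
--
--
-- def _generate_findings_html(result):
--     findings = result.get("findings", [])
--
--     if not findings:
--         return '<div class="section"><h2>📋 漏洞详情</h2><p>未发现漏洞</p></div>'
--
--     # one pass: drop each finding into its severity bucket (unknown severities -> trailing bucket)
--     buckets = [[], [], [], [], [], []]
--     for finding in findings:
--         buckets[_severity_key(finding)].append(finding)
--
--     findings_html = '<div class="section"><h2>📋 漏洞详情</h2>'
--     for bucket in buckets:
--         for finding in bucket:
--             findings_html += _finding_html(finding)
--     findings_html += '</div>'
--     return findings_html
-- ===== Notes on version B (the rewrite author's own statement) =====
-- stated objective: alternative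
-- what changed: Replaced the sorted()-with-severity-key call by a single bucketing pass into six severity buckets (plus trailing bucket for unknown severities) concatenated in severity order, which preserves the stable-sort order exactly.
import Mathlib
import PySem

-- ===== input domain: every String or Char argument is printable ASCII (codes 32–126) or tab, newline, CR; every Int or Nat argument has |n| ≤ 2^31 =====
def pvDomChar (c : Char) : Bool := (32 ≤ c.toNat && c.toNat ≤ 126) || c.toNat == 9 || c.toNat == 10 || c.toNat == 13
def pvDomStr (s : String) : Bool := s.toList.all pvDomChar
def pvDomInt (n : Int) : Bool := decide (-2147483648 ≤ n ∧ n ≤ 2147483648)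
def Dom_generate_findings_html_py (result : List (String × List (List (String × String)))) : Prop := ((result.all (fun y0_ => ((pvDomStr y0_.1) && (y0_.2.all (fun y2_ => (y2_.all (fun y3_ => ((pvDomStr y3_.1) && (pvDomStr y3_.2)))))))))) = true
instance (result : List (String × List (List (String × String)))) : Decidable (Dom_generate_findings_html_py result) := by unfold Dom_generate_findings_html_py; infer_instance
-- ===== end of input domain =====

-- B replaces the stable sorted()-by-severity call with one bucketing pass into six severity buckets
-- concatenated in severity order (objective: alternative decomposition, same output).


-- ===== PORT A =====
def generate_findings_html_py (result : List (String × List (List (String × String)))) : String :=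
  let findings := (PySem.Dict.mk result).getD "findings" []
  if findings = [] then
    "<div class=\"section\"><h2>📋 漏洞详情</h2><p>未发现漏洞</p></div>"
  else
    let severity_order : PySem.Dict String Int :=
      PySem.Dict.mk [("critical", 0), ("high", 1), ("medium", 2), ("low", 3), ("info", 4)]
    let sorted_findings := PySem.List.sorted findings
      (fun x => severity_order.getD (PySem.Str.lower ((PySem.Dict.mk x).getD "severity" "info")) 5)
    let findings_html := "<div class=\"section\"><h2>📋 漏洞详情</h2>"
    let findings_html := sorted_findings.foldl (fun acc finding =>
      let severity := PySem.Str.lower ((PySem.Dict.mk finding).getD "severity" "info")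
      let title := (PySem.Dict.mk finding).getD "title" "Unknown"
      let description := (PySem.Dict.mk finding).getD "description" ""
      let evidence := (PySem.Dict.mk finding).getD "evidence" ""
      let url := (PySem.Dict.mk finding).getD "url" ""
      acc ++ ("\n        <div class=\"finding " ++ severity ++ "\">\n            <h4>" ++ title
        ++ " <span class=\"severity " ++ severity ++ "\">" ++ PySem.Str.upper severity
        ++ "</span></h4>\n            <p class=\"description\">" ++ description ++ "</p>\n            "
        ++ (if url ≠ "" then "<p><strong>URL:</strong> " ++ url ++ "</p>" else "")
        ++ "\n            "
        ++ (if evidence ≠ "" then "<div class=\"evidence\">" ++ PySem.Str.slice evidence none (some 500) ++ "</div>" else "")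
        ++ "\n        </div>")) findings_html
    findings_html ++ "</div>"

-- ===== PORT B =====
-- Source B's module constant _SEVERITY_ORDER
def pvSeverityOrderAlt : PySem.Dict String Int :=
  PySem.Dict.mk [("critical", 0), ("high", 1), ("medium", 2), ("low", 3), ("info", 4)]

-- Source B's helper _severity_key
def pvSevKeyAlt (finding : List (String × String)) : Int :=
  pvSeverityOrderAlt.getD (PySem.Str.lower ((PySem.Dict.mk finding).getD "severity" "info")) 5

-- Source B's helper _finding_html
def pvFindingHtmlAlt (finding : List (String × String)) : String :=
  let severity := PySem.Str.lower ((PySem.Dict.mk finding).getD "severity" "info")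
  let title := (PySem.Dict.mk finding).getD "title" "Unknown"
  let description := (PySem.Dict.mk finding).getD "description" ""
  let evidence := (PySem.Dict.mk finding).getD "evidence" ""
  let url := (PySem.Dict.mk finding).getD "url" ""
  "\n        <div class=\"finding " ++ severity ++ "\">\n            <h4>" ++ title
    ++ " <span class=\"severity " ++ severity ++ "\">" ++ PySem.Str.upper severity
    ++ "</span></h4>\n            <p class=\"description\">" ++ description ++ "</p>\n            "
    ++ (if url ≠ "" then "<p><strong>URL:</strong> " ++ url ++ "</p>" else "")
    ++ "\n            "
    ++ (if evidence ≠ "" then "<div class=\"evidence\">" ++ PySem.Str.slice evidence none (some 500) ++ "</div>" else "")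
    ++ "\n        </div>"

def generate_findings_html_py_alt (result : List (String × List (List (String × String)))) : String :=
  let findings := (PySem.Dict.mk result).getD "findings" []
  if findings = [] then
    "<div class=\"section\"><h2>📋 漏洞详情</h2><p>未发现漏洞</p></div>"
  else
    -- one pass: buckets[_severity_key(finding)].append(finding); the 6 buckets as a tuple
    let buckets := findings.foldl
      (fun (b : List (List (String × String)) × List (List (String × String)) × List (List (String × String)) ×
                 List (List (String × String)) × List (List (String × String)) × List (List (String × String))) finding =>
        let k := pvSevKeyAlt finding
        if k = 0 then (b.1 ++ [finding], b.2.1, b.2.2.1, b.2.2.2.1, b.2.2.2.2.1, b.2.2.2.2.2)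
        else if k = 1 then (b.1, b.2.1 ++ [finding], b.2.2.1, b.2.2.2.1, b.2.2.2.2.1, b.2.2.2.2.2)
        else if k = 2 then (b.1, b.2.1, b.2.2.1 ++ [finding], b.2.2.2.1, b.2.2.2.2.1, b.2.2.2.2.2)
        else if k = 3 then (b.1, b.2.1, b.2.2.1, b.2.2.2.1 ++ [finding], b.2.2.2.2.1, b.2.2.2.2.2)
        else if k = 4 then (b.1, b.2.1, b.2.2.1, b.2.2.2.1, b.2.2.2.2.1 ++ [finding], b.2.2.2.2.2)
        else (b.1, b.2.1, b.2.2.1, b.2.2.2.1, b.2.2.2.2.1, b.2.2.2.2.2 ++ [finding]))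
      ([], [], [], [], [], [])
    let findings_html := [buckets.1, buckets.2.1, buckets.2.2.1, buckets.2.2.2.1, buckets.2.2.2.2.1, buckets.2.2.2.2.2].foldl
      (fun acc bucket => bucket.foldl (fun a finding => a ++ pvFindingHtmlAlt finding) acc)
      "<div class=\"section\"><h2>📋 漏洞详情</h2>"
    findings_html ++ "</div>"

-- ===== PRECONDITION & SPEC =====
def Spec_generate_findings_html_py (result : List (String × List (List (String × String)))) (out : String) : Prop := out = generate_findings_html_py_alt result
instance (result : List (String × List (List (String × String)))) (out : String) : Decidable (Spec_generate_findings_html_py result out) := by unfold Spec_generate_findings_html_py; infer_instance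

-- ===== CLAIM (what is proved, stated in full; the proofs are below) =====
def Claim_equal_generate_findings_html_py : Prop := ∀ (result : List (String × List (List (String × String)))), Dom_generate_findings_html_py result → Spec_generate_findings_html_py result (generate_findings_html_py result)

-- ===== LEMMAS AND PROOFS =====

-- bucket i of a findings list
def pvFilt (i : Int) (fs : List (List (String × String))) : List (List (String × String)) :=
  fs.filter (fun f => pvSevKeyAlt f == i)

lemma pvSevKey_cases (f : List (String × String)) :
    pvSevKeyAlt f = 0 ∨ pvSevKeyAlt f = 1 ∨ pvSevKeyAlt f = 2 ∨ pvSevKeyAlt f = 3 ∨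
      pvSevKeyAlt f = 4 ∨ pvSevKeyAlt f = 5 := by
  unfold pvSevKeyAlt pvSeverityOrderAlt PySem.Dict.getD
  generalize PySem.Str.lower ((PySem.Dict.mk f).getD "severity" "info") = s
  simp only [PySem.Dict.get?_mk_cons]
  split_ifs <;> simp [PySem.Dict.get?]

lemma pv_mem_filt {f : List (String × String)} {i : Int} {fs : List (List (String × String))}
    (h : f ∈ pvFilt i fs) : pvSevKeyAlt f = i := by
  simpa using (List.mem_filter.mp h).2

lemma pv_insertBy_append_left (before : List (String × String) → List (String × String) → Bool)
    (x : List (String × String)) (as bs : List (List (String × String)))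
    (h : ∀ a ∈ as, before x a = false) :
    PySem.List.insertBy before x (as ++ bs) = as ++ PySem.List.insertBy before x bs := by
  induction as with
  | nil => simp
  | cons a as ih =>
    simp only [List.cons_append, PySem.List.insertBy]
    rw [h a (by simp)]
    simp only [Bool.false_eq_true, if_false]
    rw [ih (fun a ha => h a (by simp [ha]))]

lemma pv_insertBy_all_before (before : List (String × String) → List (String × String) → Bool)
    (x : List (String × String)) (ys : List (List (String × String)))
    (h : ∀ y ∈ ys, before x y = true) :
    PySem.List.insertBy before x ys = x :: ys := by
  cases ys with
  | nil => simp [PySem.List.insertBy]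
  | cons y ys => simp [PySem.List.insertBy, h y (by simp)]

lemma pv_insert_split (x : List (String × String)) (as bs : List (List (String × String)))
    (h1 : ∀ a ∈ as, ¬ pvSevKeyAlt x < pvSevKeyAlt a) (h2 : ∀ b ∈ bs, pvSevKeyAlt x < pvSevKeyAlt b) :
    PySem.List.insertBy (fun a b => decide (pvSevKeyAlt a < pvSevKeyAlt b)) x (as ++ bs) = as ++ x :: bs := by
  rw [pv_insertBy_append_left _ _ _ _ (fun a ha => by simp [h1 a ha]),
      pv_insertBy_all_before _ _ _ (fun b hb => by simp [h2 b hb])]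

-- the stable sort by severity key is the concatenation of the six buckets
lemma pv_sorted_eq_buckets (fs : List (List (String × String))) :
    PySem.List.sorted fs pvSevKeyAlt =
      pvFilt 0 fs ++ pvFilt 1 fs ++ pvFilt 2 fs ++ pvFilt 3 fs ++ pvFilt 4 fs ++ pvFilt 5 fs := by
  rw [PySem.List.sorted_eq_foldl_insertBy]
  induction fs using List.reverseRecOn with
  | nil => simp [pvFilt]
  | append_singleton fs x ih =>
    rw [List.foldl_append, List.foldl_cons, List.foldl_nil, ih]
    have hfilt : ∀ i : Int, pvFilt i (fs ++ [x]) = pvFilt i fs ++ pvFilt i [x] := by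
      intro i; simp [pvFilt]
    have hone : ∀ i : Int, pvSevKeyAlt x = i → pvFilt i [x] = [x] := by
      intro i hi; simp [pvFilt, hi]
    have hnone : ∀ i : Int, pvSevKeyAlt x ≠ i → pvFilt i [x] = [] := by
      intro i hi; simp only [pvFilt, List.filter_cons, List.filter_nil]
      simp [hi]
    rcases pvSevKey_cases x with h | h | h | h | h | h
    · have e : pvFilt 0 fs ++ pvFilt 1 fs ++ pvFilt 2 fs ++ pvFilt 3 fs ++ pvFilt 4 fs ++ pvFilt 5 fs
          = pvFilt 0 fs ++ (pvFilt 1 fs ++ (pvFilt 2 fs ++ (pvFilt 3 fs ++ (pvFilt 4 fs ++ pvFilt 5 fs)))) := by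
        simp [List.append_assoc]
      rw [e, pv_insert_split x _ _
        (by intro a ha; have := pv_mem_filt ha; omega)
        (by intro b hb; simp only [List.mem_append] at hb
            rcases hb with hb|hb|hb|hb|hb <;> (have := pv_mem_filt hb; omega))]
      simp only [hfilt, hone _ h, hnone 1 (by omega), hnone 2 (by omega), hnone 3 (by omega),
        hnone 4 (by omega), hnone 5 (by omega), List.append_nil]
      simp [List.append_assoc]
    · have e : pvFilt 0 fs ++ pvFilt 1 fs ++ pvFilt 2 fs ++ pvFilt 3 fs ++ pvFilt 4 fs ++ pvFilt 5 fs
          = (pvFilt 0 fs ++ pvFilt 1 fs) ++ (pvFilt 2 fs ++ (pvFilt 3 fs ++ (pvFilt 4 fs ++ pvFilt 5 fs))) := by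
        simp [List.append_assoc]
      rw [e, pv_insert_split x _ _
        (by intro a ha; simp only [List.mem_append] at ha
            rcases ha with ha|ha <;> (have := pv_mem_filt ha; omega))
        (by intro b hb; simp only [List.mem_append] at hb
            rcases hb with hb|hb|hb|hb <;> (have := pv_mem_filt hb; omega))]
      simp only [hfilt, hone _ h, hnone 0 (by omega), hnone 2 (by omega), hnone 3 (by omega),
        hnone 4 (by omega), hnone 5 (by omega), List.append_nil]
      simp [List.append_assoc]
    · have e : pvFilt 0 fs ++ pvFilt 1 fs ++ pvFilt 2 fs ++ pvFilt 3 fs ++ pvFilt 4 fs ++ pvFilt 5 fs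
          = (pvFilt 0 fs ++ (pvFilt 1 fs ++ pvFilt 2 fs)) ++ (pvFilt 3 fs ++ (pvFilt 4 fs ++ pvFilt 5 fs)) := by
        simp [List.append_assoc]
      rw [e, pv_insert_split x _ _
        (by intro a ha; simp only [List.mem_append] at ha
            rcases ha with ha|ha|ha <;> (have := pv_mem_filt ha; omega))
        (by intro b hb; simp only [List.mem_append] at hb
            rcases hb with hb|hb|hb <;> (have := pv_mem_filt hb; omega))]
      simp only [hfilt, hone _ h, hnone 0 (by omega), hnone 1 (by omega), hnone 3 (by omega),
        hnone 4 (by omega), hnone 5 (by omega), List.append_nil]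
      simp [List.append_assoc]
    · have e : pvFilt 0 fs ++ pvFilt 1 fs ++ pvFilt 2 fs ++ pvFilt 3 fs ++ pvFilt 4 fs ++ pvFilt 5 fs
          = (pvFilt 0 fs ++ (pvFilt 1 fs ++ (pvFilt 2 fs ++ pvFilt 3 fs))) ++ (pvFilt 4 fs ++ pvFilt 5 fs) := by
        simp [List.append_assoc]
      rw [e, pv_insert_split x _ _
        (by intro a ha; simp only [List.mem_append] at ha
            rcases ha with ha|ha|ha|ha <;> (have := pv_mem_filt ha; omega))
        (by intro b hb; simp only [List.mem_append] at hb
            rcases hb with hb|hb <;> (have := pv_mem_filt hb; omega))]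
      simp only [hfilt, hone _ h, hnone 0 (by omega), hnone 1 (by omega), hnone 2 (by omega),
        hnone 4 (by omega), hnone 5 (by omega), List.append_nil]
      simp [List.append_assoc]
    · have e : pvFilt 0 fs ++ pvFilt 1 fs ++ pvFilt 2 fs ++ pvFilt 3 fs ++ pvFilt 4 fs ++ pvFilt 5 fs
          = (pvFilt 0 fs ++ (pvFilt 1 fs ++ (pvFilt 2 fs ++ (pvFilt 3 fs ++ pvFilt 4 fs)))) ++ pvFilt 5 fs := by
        simp [List.append_assoc]
      rw [e, pv_insert_split x _ _
        (by intro a ha; simp only [List.mem_append] at ha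
            rcases ha with ha|ha|ha|ha|ha <;> (have := pv_mem_filt ha; omega))
        (by intro b hb; have := pv_mem_filt hb; omega)]
      simp only [hfilt, hone _ h, hnone 0 (by omega), hnone 1 (by omega), hnone 2 (by omega),
        hnone 3 (by omega), hnone 5 (by omega), List.append_nil]
      simp [List.append_assoc]
    · rw [PySem.List.insertBy_of_forall_not_before _ _ _
        (by intro a ha; simp only [List.mem_append] at ha
            rcases ha with ((((ha|ha)|ha)|ha)|ha)|ha <;>
              (have := pv_mem_filt ha; simp; omega))]
      simp only [hfilt, hone _ h, hnone 0 (by omega), hnone 1 (by omega), hnone 2 (by omega),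
        hnone 3 (by omega), hnone 4 (by omega), List.append_nil]
      simp [List.append_assoc]

-- B's bucketing pass computes exactly the six filters
lemma pv_buckets_eq (fs : List (List (String × String)))
    (b0 b1 b2 b3 b4 b5 : List (List (String × String))) :
    fs.foldl
      (fun (b : List (List (String × String)) × List (List (String × String)) × List (List (String × String)) ×
                 List (List (String × String)) × List (List (String × String)) × List (List (String × String))) finding =>
        let k := pvSevKeyAlt finding
        if k = 0 then (b.1 ++ [finding], b.2.1, b.2.2.1, b.2.2.2.1, b.2.2.2.2.1, b.2.2.2.2.2)
        else if k = 1 then (b.1, b.2.1 ++ [finding], b.2.2.1, b.2.2.2.1, b.2.2.2.2.1, b.2.2.2.2.2)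
        else if k = 2 then (b.1, b.2.1, b.2.2.1 ++ [finding], b.2.2.2.1, b.2.2.2.2.1, b.2.2.2.2.2)
        else if k = 3 then (b.1, b.2.1, b.2.2.1, b.2.2.2.1 ++ [finding], b.2.2.2.2.1, b.2.2.2.2.2)
        else if k = 4 then (b.1, b.2.1, b.2.2.1, b.2.2.2.1, b.2.2.2.2.1 ++ [finding], b.2.2.2.2.2)
        else (b.1, b.2.1, b.2.2.1, b.2.2.2.1, b.2.2.2.2.1, b.2.2.2.2.2 ++ [finding]))
      (b0, b1, b2, b3, b4, b5) =
    (b0 ++ pvFilt 0 fs, b1 ++ pvFilt 1 fs, b2 ++ pvFilt 2 fs,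
     b3 ++ pvFilt 3 fs, b4 ++ pvFilt 4 fs, b5 ++ pvFilt 5 fs) := by
  induction fs generalizing b0 b1 b2 b3 b4 b5 with
  | nil => simp [pvFilt]
  | cons f fs ih =>
    rw [List.foldl_cons]
    rcases pvSevKey_cases f with h | h | h | h | h | h <;>
      simp only [h] <;>
      · rw [ih]
        simp [pvFilt, h]

-- ===== VERDICT (by name: the statement is the Claim_ definition above) =====
theorem generate_findings_html_py_spec : Claim_equal_generate_findings_html_py := by
  intro result _
  unfold Spec_generate_findings_html_py
  simp only [generate_findings_html_py, generate_findings_html_py_alt]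
  split_ifs with hf
  · rfl
  · have hkey : (fun x : List (String × String) =>
        (PySem.Dict.mk [("critical", (0:Int)), ("high", 1), ("medium", 2), ("low", 3), ("info", 4)]).getD
          (PySem.Str.lower ((PySem.Dict.mk x).getD "severity" "info")) 5) = pvSevKeyAlt := rfl
    rw [hkey, pv_sorted_eq_buckets, pv_buckets_eq]
    simp only [List.nil_append, List.foldl_cons, List.foldl_nil, List.foldl_append]
    rfl
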